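-- pv_equiv track=rewrite | github.com/AlbertMargaryan/Python_CPS109_Problems_Solution | main.py | winning_card
-- ===== SOURCE A (Python) =====
-- def winning_card(trick, trump=None):
--     if trump is None:
--         return winning_card(trick, trick[0][1])
--     else:
--         vals = ['two', 'three', 'four', 'five', 'six', 'seven', 'eight', 'nine', 'ten', 'jack', 'queen', 'king', 'ace']
--
--         trumpCards = []
--         for x, y in trick:
--             if trump in y:
--                 trumpCards.append((x, y))
--         if trumpCards:
--             maxCardNum = 0
--             maxCard = ""
--             for card in trumpCards:
--                 if int(vals.index(card[0]) + 1) > maxCardNum: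
--                     maxCardNum = int(vals.index(card[0]))
--                     maxCard = card
--             return maxCard
--         else:
--             return winning_card(trick, trick[0][1])
-- ===== SOURCE B (Python) =====
-- def winning_card(trick, trump=None):
--     vals = ['two', 'three', 'four', 'five', 'six', 'seven', 'eight', 'nine', 'ten', 'jack', 'queen', 'king', 'ace']
--     suit = trump if trump is not None else trick[0][1]
--     trumps = [c for c in trick if suit in c[1]]
--     if not trumps:
--         suit = trick[0][1]
--         trumps = [c for c in trick if suit in c[1]]
--     return sorted(trumps, key=lambda c: vals.index(c[0]))[-1]
-- ===== Notes on version B (the rewrite author's own statement) =====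
-- stated objective: simpler
-- what changed: B inlines A's bounded recursive fallback (trump suit, else first card's suit) into a straight-line suit selection and picks the winner as the last element of a stable sort keyed by rank index, instead of A's recursion plus manual running-max loop.
-- outside the precondition, e.g. on winning_card([], None): A raises IndexError, B raises IndexError
import Mathlib
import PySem

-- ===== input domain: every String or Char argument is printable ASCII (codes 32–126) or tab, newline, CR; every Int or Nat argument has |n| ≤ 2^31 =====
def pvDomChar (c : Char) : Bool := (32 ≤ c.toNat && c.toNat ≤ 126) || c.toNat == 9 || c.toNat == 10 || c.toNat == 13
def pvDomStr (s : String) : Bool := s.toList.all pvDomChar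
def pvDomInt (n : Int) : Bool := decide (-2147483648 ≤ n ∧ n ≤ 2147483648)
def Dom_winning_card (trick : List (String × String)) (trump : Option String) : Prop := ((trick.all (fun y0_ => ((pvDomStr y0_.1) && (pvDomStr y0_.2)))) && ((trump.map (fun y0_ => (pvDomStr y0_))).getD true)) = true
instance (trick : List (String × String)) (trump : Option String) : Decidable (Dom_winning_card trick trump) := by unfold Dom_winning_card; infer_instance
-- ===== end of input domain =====

-- B inlines A's bounded recursion (trump-or-first-suit with one fallback) and picks the
-- winner as the last element of a stable sort by rank index, instead of A's manual
-- running-max loop; objective: simpler.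

def pvVals : List String :=
  ["two", "three", "four", "five", "six", "seven", "eight", "nine", "ten", "jack", "queen", "king", "ace"]

-- ===== PORT A =====
-- A's inner selection loop: maxCardNum/maxCard running state; vals.index raising
-- (rank not in vals) is `none` and excluded by Pre_ (Python raises ValueError there).
def wcLoopA (trumpCards : List (String × String)) : String × String :=
  (trumpCards.foldl
    (fun (st : Int × (String × String)) card =>
      match PySem.List.index? pvVals card.1 with
      | some i => if (i : Int) + 1 > st.1 then ((i : Int), card) else st
      | none => st)
    (0, ("", ""))).2

-- one level of A's body for a concrete trump string; `fuel` bounds the recursive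
-- fallback call winning_card(trick, trick[0][1]) (a pure termination guard: with
-- trick ≠ [] the fallback level always finds a trump card, and on trick = [] Python
-- raises IndexError — excluded by Pre_, junk value here).
def wcLevelA (trick : List (String × String)) : String → Nat → String × String
  | t, fuel =>
    let trumpCards := trick.filter (fun c => PySem.Str.isIn t c.2)
    if trumpCards.isEmpty then
      match fuel, PySem.List.pyGet? trick 0 with
      | f + 1, some c => wcLevelA trick c.2 f
      | _, _ => ("", "")
    else wcLoopA trumpCards
  termination_by t fuel => fuel

def winning_card (trick : List (String × String)) (trump : Option String) : String × String :=
  match trump with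
  | none =>
    match PySem.List.pyGet? trick 0 with
    | some c => wcLevelA trick c.2 1
    | none => ("", "")   -- IndexError trick[0]; excluded by Pre_
  | some t => wcLevelA trick t 1

-- ===== PORT B =====
def winning_card_alt (trick : List (String × String)) (trump : Option String) : String × String :=
  match trick.head? with
  | none => ("", "")    -- trick[0] IndexError in B too; excluded by Pre_
  | some c0 =>
    let suit := trump.getD c0.2
    let trumps := trick.filter (fun c => PySem.Str.isIn suit c.2)
    let trumps := if trumps.isEmpty then trick.filter (fun c => PySem.Str.isIn c0.2 c.2) else trumps
    ((PySem.List.sorted trumps (fun c => (PySem.List.index? pvVals c.1).getD 0)).getLast?).getD ("", "")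

-- ===== PRECONDITION & SPEC =====
-- the cards whose rank both programs look up in vals
def pvChosen (trick : List (String × String)) (trump : Option String) : List (String × String) :=
  match trick.head? with
  | none => []
  | some c0 =>
    let suit := trump.getD c0.2
    let t1 := trick.filter (fun c => PySem.Str.isIn suit c.2)
    if t1.isEmpty then trick.filter (fun c => PySem.Str.isIn c0.2 c.2) else t1

-- Pre_ excludes exactly the raising inputs: trick = [] (IndexError on trick[0]) and
-- a considered trump card whose rank is not in vals (ValueError from vals.index).
def Pre_winning_card (trick : List (String × String)) (trump : Option String) : Prop :=
  trick ≠ [] ∧ ∀ c ∈ pvChosen trick trump, c.1 ∈ pvVals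
instance (trick : List (String × String)) (trump : Option String) : Decidable (Pre_winning_card trick trump) := by unfold Pre_winning_card; infer_instance

def pvWitness_winning_card : (List (String × String)) × Option String :=
  ([("two", "hearts"), ("ace", "spades"), ("king", "spades")], some "spades")

def Spec_winning_card (trick : List (String × String)) (trump : Option String) (out : String × String) : Prop := out = winning_card_alt trick trump
instance (trick : List (String × String)) (trump : Option String) (out : String × String) : Decidable (Spec_winning_card trick trump out) := by unfold Spec_winning_card; infer_instance

-- ===== CLAIM (what is proved, stated in full; the proofs are below) =====
def Claim_equal_winning_card : Prop := ∀ (trick : List (String × String)) (trump : Option String), Dom_winning_card trick trump → Pre_winning_card trick trump → Spec_winning_card trick trump (winning_card trick trump)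

-- ===== LEMMAS AND PROOFS =====

-- the common "last argmax" value both selections compute
def pvLastMax (b : String × String) (l : List (String × String)) : String × String :=
  l.foldl (fun best c => if pvVals.idxOf best.1 ≤ pvVals.idxOf c.1 then c else best) b

theorem pv_index_mem {α : Type} [BEq α] [LawfulBEq α] (l : List α) (c : α) (h : c ∈ l) :
    PySem.List.index? l c = some (l.idxOf c) := by
  rw [PySem.List.index?_eq_idxOf?]
  induction l with
  | nil => simp at h
  | cons x t ih =>
    by_cases hx : x = c
    · subst hx; simp [List.idxOf?_cons]
    · have hm : c ∈ t := by
        rcases List.mem_cons.mp h with h1 | h1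
        · exact absurd h1.symm hx
        · exact h1
      simp [List.idxOf?_cons, hx, ih hm]

-- A's loop invariant: from state (idxOf b, b) it computes pvLastMax b t
theorem wcLoopA_aux (t : List (String × String)) :
    ∀ b : String × String, b.1 ∈ pvVals → (∀ c ∈ t, c.1 ∈ pvVals) →
    t.foldl
      (fun (st : Int × (String × String)) card =>
        match PySem.List.index? pvVals card.1 with
        | some i => if (i : Int) + 1 > st.1 then ((i : Int), card) else st
        | none => st)
      (((pvVals.idxOf b.1 : Nat) : Int), b) =
      (((pvVals.idxOf (pvLastMax b t).1 : Nat) : Int), pvLastMax b t) := by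
  induction t with
  | nil => intro b hb hall; simp [pvLastMax]
  | cons c t ih =>
    intro b hb hall
    have hc : c.1 ∈ pvVals := hall c (by simp)
    have hrest : ∀ d ∈ t, d.1 ∈ pvVals := fun d hd => hall d (by simp [hd])
    have hstep : pvLastMax b (c :: t) = pvLastMax (if pvVals.idxOf b.1 ≤ pvVals.idxOf c.1 then c else b) t := rfl
    rw [List.foldl_cons, pv_index_mem pvVals c.1 hc, hstep]
    by_cases hle : pvVals.idxOf b.1 ≤ pvVals.idxOf c.1
    · have : ((pvVals.idxOf c.1 : Nat) : Int) + 1 > ((pvVals.idxOf b.1 : Nat) : Int) := by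
        omega
      simp only [this, if_pos]
      simpa [hle] using ih c hc hrest
    · have : ¬ (((pvVals.idxOf c.1 : Nat) : Int) + 1 > ((pvVals.idxOf b.1 : Nat) : Int)) := by
        omega
      simp only [this, if_false]
      simpa [hle] using ih b hb hrest

-- A's loop computes pvLastMax (the initial state (0, "") is replaced at the first card)
theorem wcLoopA_eq (h : String × String) (t : List (String × String))
    (hall : ∀ c ∈ h :: t, c.1 ∈ pvVals) :
    wcLoopA (h :: t) = pvLastMax h t := by
  have hh : h.1 ∈ pvVals := hall h (by simp)
  have hpos : ((pvVals.idxOf h.1 : Nat) : Int) + 1 > (0 : Int) := by positivity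
  unfold wcLoopA
  rw [List.foldl_cons, pv_index_mem pvVals h.1 hh]
  simp only [hpos, if_pos]
  rw [wcLoopA_aux t h hh (fun c hc => hall c (by simp [hc]))]

-- last element after a stable insert into a key-sorted list
theorem getLast_insertBy (key : (String × String) → Nat) (x : String × String) :
    ∀ (ys : List (String × String)) (b : String × String),
    ys.Pairwise (fun a c => key a ≤ key c) → ys.getLast? = some b →
    (PySem.List.insertBy (fun a c => decide (key a < key c)) x ys).getLast? =
      some (if key b ≤ key x then x else b) := by
  intro ys
  induction ys with
  | nil => intro b _ hb; simp at hb
  | cons y ys ih =>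
    intro b hpw hb
    simp only [PySem.List.insertBy]
    by_cases hxy : key x < key y
    · -- x goes in front: last element unchanged = b; and key b ≤ key x is false
      have hyb : key y ≤ key b := by
        rcases List.getLast?_eq_some_iff.mp hb with ⟨pre, hpre⟩
        cases pre with
        | nil => simp at hpre; simp [hpre]
        | cons p ps =>
          have hbmem : b ∈ ys := by
            have : y :: ys = p :: (ps ++ [b]) := by simpa using hpre
            have : ys = ps ++ [b] := (List.cons.injEq _ _ _ _ ▸ this).2
            simp [this]
          exact (List.pairwise_cons.mp hpw).1 b hbmem
      have : ¬ key b ≤ key x := by omega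
      simp [hxy, this, hb]
    · cases ys with
      | nil =>
        -- singleton: b = y, x appended
        have hby : y = b := by simpa using hb
        subst hby
        have : key y ≤ key x := by omega
        simp [hxy, this, PySem.List.insertBy]
      | cons z zs =>
        have hb' : (z :: zs).getLast? = some b := by simpa using hb
        have hpw' : (z :: zs).Pairwise (fun a c => key a ≤ key c) :=
          (List.pairwise_cons.mp hpw).2
        have := ih b hpw' hb'
        simp only [hxy, if_false, decide_eq_true_eq]
        rw [List.getLast?_cons, this]
        simp

theorem sorted_concat (key : (String × String) → Nat) (us : List (String × String)) (x : String × String) :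
    PySem.List.sorted (us ++ [x]) key =
      PySem.List.insertBy (fun a c => decide (key a < key c)) x (PySem.List.sorted us key) := by
  rw [PySem.List.sorted_eq_foldl_insertBy, PySem.List.sorted_eq_foldl_insertBy, List.foldl_append]
  rfl

-- last of the stable sort = running last-argmax
theorem sorted_getLast_aux (key : (String × String) → Nat) :
    ∀ (t us : List (String × String)) (b : String × String),
    (PySem.List.sorted us key).getLast? = some b →
    (PySem.List.sorted (us ++ t) key).getLast? =
      some (t.foldl (fun best c => if key best ≤ key c then c else best) b) := by
  intro t
  induction t with
  | nil => intro us b hb; simpa using hb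
  | cons x t ih =>
    intro us b hb
    have hstep : (PySem.List.sorted (us ++ [x]) key).getLast? =
        some (if key b ≤ key x then x else b) := by
      rw [sorted_concat]
      exact getLast_insertBy key x (PySem.List.sorted us key)
        b (PySem.List.sorted_pairwise us key) hb
    have : us ++ x :: t = (us ++ [x]) ++ t := by simp
    rw [this, ih (us ++ [x]) _ hstep]
    rfl

-- with all ranks in vals, B's key agrees with idxOf, so the fold is pvLastMax
theorem foldl_key_eq (t : List (String × String)) :
    ∀ b : String × String, b.1 ∈ pvVals → (∀ c ∈ t, c.1 ∈ pvVals) →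
    t.foldl (fun best c =>
        if (PySem.List.index? pvVals best.1).getD 0 ≤ (PySem.List.index? pvVals c.1).getD 0
        then c else best) b = pvLastMax b t := by
  induction t with
  | nil => intro b _ _; simp [pvLastMax]
  | cons c t ih =>
    intro b hb hall
    have hc : c.1 ∈ pvVals := hall c (by simp)
    have hrest : ∀ d ∈ t, d.1 ∈ pvVals := fun d hd => hall d (by simp [hd])
    have hstep : pvLastMax b (c :: t) = pvLastMax (if pvVals.idxOf b.1 ≤ pvVals.idxOf c.1 then c else b) t := rfl
    rw [List.foldl_cons, hstep, pv_index_mem pvVals b.1 hb, pv_index_mem pvVals c.1 hc]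
    simp only [Option.getD_some]
    by_cases hle : pvVals.idxOf b.1 ≤ pvVals.idxOf c.1
    · simp only [hle, if_true]; exact ih c hc hrest
    · simp only [hle, if_false]; exact ih b hb hrest

theorem core_eq (h : String × String) (t : List (String × String))
    (hall : ∀ c ∈ h :: t, c.1 ∈ pvVals) :
    wcLoopA (h :: t) =
      ((PySem.List.sorted (h :: t) (fun c => (PySem.List.index? pvVals c.1).getD 0)).getLast?).getD ("", "") := by
  have hh : h.1 ∈ pvVals := hall h (by simp)
  have hrest : ∀ d ∈ t, d.1 ∈ pvVals := fun d hd => hall d (by simp [hd])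
  have hsingle : (PySem.List.sorted [h] (fun c => (PySem.List.index? pvVals c.1).getD 0)).getLast? = some h := by
    rw [PySem.List.sorted_eq_foldl_insertBy]; rfl
  have := sorted_getLast_aux (fun c => (PySem.List.index? pvVals c.1).getD 0) t [h] h hsingle
  simp only [List.singleton_append] at this
  rw [this, wcLoopA_eq h t hall, Option.getD_some]
  exact (foldl_key_eq t h hh hrest).symm

-- one level of A versus B's inlined selection, for the actual suit s
theorem level_eq (h0 : String × String) (rest : List (String × String)) (s : String)
    (hall : ∀ c ∈ (if ((h0 :: rest).filter (fun c => PySem.Str.isIn s c.2)).isEmpty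
                   then (h0 :: rest).filter (fun c => PySem.Str.isIn h0.2 c.2)
                   else (h0 :: rest).filter (fun c => PySem.Str.isIn s c.2)),
            c.1 ∈ pvVals) :
    wcLevelA (h0 :: rest) s 1 =
      ((PySem.List.sorted
          (if ((h0 :: rest).filter (fun c => PySem.Str.isIn s c.2)).isEmpty
           then (h0 :: rest).filter (fun c => PySem.Str.isIn h0.2 c.2)
           else (h0 :: rest).filter (fun c => PySem.Str.isIn s c.2))
          (fun c => (PySem.List.index? pvVals c.1).getD 0)).getLast?).getD ("", "") := by
  have hself : PySem.Str.isIn h0.2 h0.2 = true := by rw [PySem.Str.isIn_iff_infix]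
  have hmem2 : h0 ∈ (h0 :: rest).filter (fun c => PySem.Str.isIn h0.2 c.2) :=
    List.mem_filter.mpr ⟨by simp, hself⟩
  by_cases hempty : ((h0 :: rest).filter (fun c => PySem.Str.isIn s c.2)).isEmpty = true
  · -- fallback: A recurses with trick[0][1], B refilters with it
    obtain ⟨h2, t2, ht2⟩ : ∃ h2 t2, (h0 :: rest).filter (fun c => PySem.Str.isIn h0.2 c.2) = h2 :: t2 := by
      cases hx : (h0 :: rest).filter (fun c => PySem.Str.isIn h0.2 c.2) with
      | nil => rw [hx] at hmem2; simp at hmem2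
      | cons a b => exact ⟨a, b, rfl⟩
    have hne2 : ((h0 :: rest).filter (fun c => PySem.Str.isIn h0.2 c.2)).isEmpty = false := by
      rw [ht2]; rfl
    have hall2 : ∀ c ∈ h2 :: t2, c.1 ∈ pvVals := by
      intro c hc
      exact hall c (by rw [if_pos hempty, ht2]; exact hc)
    unfold wcLevelA
    simp only [hempty, if_true, PySem.List.pyGet?_zero_cons]
    unfold wcLevelA
    simp only [ht2]
    exact core_eq h2 t2 hall2
  · obtain ⟨h1, t1, ht1⟩ : ∃ h1 t1, (h0 :: rest).filter (fun c => PySem.Str.isIn s c.2) = h1 :: t1 := by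
      cases hx : (h0 :: rest).filter (fun c => PySem.Str.isIn s c.2) with
      | nil => rw [hx] at hempty; simp at hempty
      | cons a b => exact ⟨a, b, rfl⟩
    have hef : ((h0 :: rest).filter (fun c => PySem.Str.isIn s c.2)).isEmpty = false := by
      rw [ht1]; rfl
    have hall1 : ∀ c ∈ h1 :: t1, c.1 ∈ pvVals := by
      intro c hc
      exact hall c (by rw [if_neg hempty, ht1]; exact hc)
    unfold wcLevelA
    simp only [ht1]
    exact core_eq h1 t1 hall1

-- ===== VERDICT (by name: the statement is the Claim_ definition above) =====
theorem winning_card_spec : Claim_equal_winning_card := by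
  intro trick trump _ hpre
  obtain ⟨hne, hall⟩ := hpre
  match trick with
  | [] => exact absurd rfl hne
  | h0 :: rest =>
    unfold pvChosen at hall
    simp only [List.head?_cons] at hall
    unfold Spec_winning_card winning_card winning_card_alt
    simp only [List.head?_cons]
    cases trump with
    | none =>
      simp only [Option.getD_none] at hall ⊢
      simp only [PySem.List.pyGet?_zero_cons]
      exact level_eq h0 rest h0.2 hall
    | some t =>
      simp only [Option.getD_some] at hall ⊢
      exact level_eq h0 rest t hall
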